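-- pv_equiv track=rewrite | github.com/rickyurvinaunab/INTRO_11285 | clases/funciones2/encontrar_segundo_apellido.py | encontrar_segundo_apellido
-- ===== SOURCE A (Python) =====
-- def encontrar_segundo_apellido(nombre):
--     apellido = ""
--     contador = 0
--     for caracter in nombre:
--         if caracter == " ":
--             contador += 1
--         if contador == 1 and caracter != " ":
--             apellido += caracter
--     return apellido
-- ===== SOURCE B (Python) =====
-- def encontrar_segundo_apellido(nombre):
--     parts = nombre.split(" ")
--     return parts[1] if len(parts) >= 2 else ""
-- ===== Notes on version B (the rewrite author's own statement) =====
-- stated objective: idiomatic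
-- what changed: Replaces the character-by-character space-counter scan with tokenization: split on a single space and take the second token (empty string if there is none).
import Mathlib
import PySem

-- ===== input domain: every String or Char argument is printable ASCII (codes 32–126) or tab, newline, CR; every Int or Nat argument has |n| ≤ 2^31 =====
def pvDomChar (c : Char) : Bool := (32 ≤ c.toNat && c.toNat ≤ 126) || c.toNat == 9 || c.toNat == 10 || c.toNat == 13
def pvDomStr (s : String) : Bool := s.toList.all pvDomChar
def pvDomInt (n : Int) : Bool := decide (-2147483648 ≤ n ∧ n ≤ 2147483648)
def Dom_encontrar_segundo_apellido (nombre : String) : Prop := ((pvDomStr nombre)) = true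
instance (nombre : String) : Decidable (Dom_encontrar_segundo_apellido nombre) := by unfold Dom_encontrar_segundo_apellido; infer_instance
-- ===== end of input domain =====

-- B replaces A's space-counter character scan by split-on-space tokenization (same cost, plainer); return values proved equal on all inputs.

-- ===== PORT A =====
-- loop state: (apellido, contador); 'apellido += caracter' is String.push
def encontrar_segundo_apellido (nombre : String) : String :=
  (nombre.toList.foldl
    (fun (st : String × Int) caracter =>
      let contador := if caracter = ' ' then st.2 + 1 else st.2
      let apellido := if contador = 1 ∧ caracter ≠ ' ' then st.1.push caracter else st.1
      (apellido, contador))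
    ("", 0)).1

-- ===== PORT B =====
def encontrar_segundo_apellido_alt (nombre : String) : String :=
  match PySem.Str.split? nombre " " with
  | some parts => if 2 ≤ parts.length then parts.getD 1 "" else ""
  | none => ""

-- ===== PRECONDITION & SPEC =====
def Spec_encontrar_segundo_apellido (nombre : String) (out : String) : Prop := out = encontrar_segundo_apellido_alt nombre
instance (nombre : String) (out : String) : Decidable (Spec_encontrar_segundo_apellido nombre out) := by unfold Spec_encontrar_segundo_apellido; infer_instance

-- ===== CLAIM (what is proved, stated in full; the proofs are below) =====
def Claim_equal_encontrar_segundo_apellido : Prop := ∀ (nombre : String), Dom_encontrar_segundo_apellido nombre → Spec_encontrar_segundo_apellido nombre (encontrar_segundo_apellido nombre)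

-- ===== LEMMAS AND PROOFS =====

-- A's loop body, named (definitionally equal to the lambda in the port)
def stepA (st : String × Int) (caracter : Char) : String × Int :=
  let contador := if caracter = ' ' then st.2 + 1 else st.2
  let apellido := if contador = 1 ∧ caracter ≠ ' ' then st.1.push caracter else st.1
  (apellido, contador)

-- the second token of cs: what lies after the first space, up to the next space
def sndTok (cs : List Char) : List Char :=
  match cs.dropWhile (· ≠ ' ') with
  | [] => []
  | _ :: q => q.takeWhile (· ≠ ' ')

theorem loopA (cs : List Char) (ap : String) (cont : Int) (h : 0 ≤ cont) :
    (cs.foldl stepA (ap, cont)).1 =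
    if cont = 0 then ap ++ String.ofList (sndTok cs)
    else if cont = 1 then ap ++ String.ofList (cs.takeWhile (· ≠ ' '))
    else ap := by
  induction cs generalizing ap cont with
  | nil =>
    simp only [List.foldl_nil, sndTok, List.dropWhile_nil, List.takeWhile_nil]
    split_ifs <;> simp
  | cons c rest ih =>
    rw [List.foldl_cons]
    by_cases hc : c = ' '
    · subst hc
      rcases eq_or_ne cont 0 with h0 | h0
      · subst h0
        rw [show stepA (ap, 0) ' ' = (ap, 1) by simp [stepA], ih _ 1 (by omega)]
        simp [sndTok, List.dropWhile]
      · rcases eq_or_ne cont 1 with h1 | h1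
        · subst h1
          rw [show stepA (ap, 1) ' ' = (ap, 2) by simp [stepA], ih _ 2 (by omega)]
          simp [List.takeWhile]
        · rw [show stepA (ap, cont) ' ' = (ap, cont + 1) by simp [stepA],
            ih _ (cont + 1) (by omega)]
          rw [if_neg (by omega), if_neg (by omega), if_neg h0, if_neg h1]
    · rcases eq_or_ne cont 1 with h1 | h1
      · subst h1
        have hstep : stepA (ap, 1) c = (ap.push c, 1) := by simp [stepA, hc]
        rw [hstep, ih _ 1 (by omega)]
        simp only [if_neg (by norm_num : (1:Int) ≠ 0)]
        rw [List.takeWhile_cons_of_pos (by simp [hc])]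
        apply String.toList_inj.mp
        simp
      · have hstep : stepA (ap, cont) c = (ap, cont) := by
          simp only [stepA, if_neg hc]
          rw [if_neg (fun ⟨e, _⟩ => h1 e)]
        rw [hstep, ih _ cont h]
        rcases eq_or_ne cont 0 with h0 | h0
        · subst h0
          rw [if_pos rfl, if_pos rfl]
          have : sndTok (c :: rest) = sndTok rest := by
            unfold sndTok
            rw [List.dropWhile_cons_of_pos (by simp [hc])]
          rw [this]
        · rw [if_neg h0, if_neg h0, if_neg h1, if_neg h1]

-- A computes exactly the second token
theorem resA (nombre : String) :
    encontrar_segundo_apellido nombre = String.ofList (sndTok nombre.toList) := by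
  have : encontrar_segundo_apellido nombre = (nombre.toList.foldl stepA ("", 0)).1 := rfl
  rw [this, loopA _ _ _ le_rfl]
  simp

-- split on a single space, accumulator form
def split1 : List Char → List Char → List (List Char)
  | [], cur => [cur.reverse]
  | c :: rest, cur => if c = ' ' then cur.reverse :: split1 rest [] else split1 rest (c :: cur)

theorem go_eq (fuel : Nat) (l cur : List Char) (acc : List (List Char)) (h : l.length ≤ fuel) :
    PySem.Chars.splitOn.go [' '] fuel l cur acc = acc.reverse ++ split1 l cur := by
  induction fuel generalizing l cur acc with
  | zero =>
    have : l = [] := by cases l <;> simp_all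
    subst this
    simp [PySem.Chars.splitOn.go, split1]
  | succ n ih =>
    cases l with
    | nil => simp [PySem.Chars.splitOn.go, split1]
    | cons c rest =>
      by_cases hc : c = ' '
      · subst hc
        have hp : List.isPrefixOf [' '] (' ' :: rest) = true := by simp [List.isPrefixOf]
        rw [PySem.Chars.splitOn.go, if_pos hp]
        simp only [List.length_cons] at h
        rw [show List.drop [' '].length (' ' :: rest) = rest from rfl,
          ih rest [] (cur.reverse :: acc) (by omega)]
        simp [split1]
      · have hp : List.isPrefixOf [' '] (c :: rest) = false := by
          simp [List.isPrefixOf]; exact fun e => absurd e.symm hc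
        rw [PySem.Chars.splitOn.go, if_neg (by simp [hp])]
        simp only [List.length_cons] at h
        rw [ih rest (c :: cur) acc (by omega)]
        simp [split1, hc]

theorem split1_eq (cs cur : List Char) :
    split1 cs cur =
      (cur.reverse ++ cs.takeWhile (· ≠ ' ')) ::
      (match cs.dropWhile (· ≠ ' ') with
       | [] => []
       | _ :: q => split1 q []) := by
  induction cs generalizing cur with
  | nil => simp [split1]
  | cons c rest ih =>
    by_cases hc : c = ' '
    · subst hc; simp [split1, List.takeWhile, List.dropWhile]
    · have hdw : List.dropWhile (fun x => decide (x ≠ ' ')) (c :: rest) =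
          List.dropWhile (fun x => decide (x ≠ ' ')) rest :=
        List.dropWhile_cons_of_pos (by simp [hc])
      rw [split1, if_neg hc, ih (c :: cur),
        List.takeWhile_cons_of_pos (by simp [hc]), hdw]
      simp

theorem split_nombre (nombre : String) :
    PySem.Str.split? nombre " " = some ((split1 nombre.toList []).map String.ofList) := by
  simp only [PySem.Str.split?, PySem.Chars.split?]
  rw [if_neg (by simp), PySem.Chars.splitOn,
    show (" ".toList) = [' '] from rfl,
    go_eq (nombre.toList.length + 1) nombre.toList [] [] (by omega)]
  rfl

-- ===== VERDICT (by name: the statement is the Claim_ definition above) =====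
theorem encontrar_segundo_apellido_spec : Claim_equal_encontrar_segundo_apellido := by
  intro nombre _
  unfold Spec_encontrar_segundo_apellido
  rw [resA]
  unfold encontrar_segundo_apellido_alt
  rw [split_nombre]
  cases hd : nombre.toList.dropWhile (· ≠ ' ') with
  | nil =>
    have hs : split1 nombre.toList [] = [nombre.toList.takeWhile (· ≠ ' ')] := by
      rw [split1_eq, hd]; simp
    rw [hs]
    have : sndTok nombre.toList = [] := by unfold sndTok; rw [hd]
    rw [this]
    simp
  | cons d q =>
    have hs : split1 nombre.toList [] =
        nombre.toList.takeWhile (· ≠ ' ') ::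
        (q.takeWhile (· ≠ ' ') ++ [].reverse) ::
        (match q.dropWhile (· ≠ ' ') with
         | [] => []
         | _ :: q' => split1 q' []) := by
      rw [split1_eq, hd]
      dsimp only
      rw [split1_eq q]
      simp
    rw [hs]
    have : sndTok nombre.toList = q.takeWhile (· ≠ ' ') := by unfold sndTok; rw [hd]
    rw [this]
    simp
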